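-- pv_equiv track=rewrite | github.com/BiryaniBoi/machine_learning_projects | unit0/battleship2026/battleship.py | makeHiddenBoard
-- ===== SOURCE A (Python) =====
-- def makeHiddenBoard(board, ships, firedAt):
--     '''
--     Returns the "visible" version of the board based on these
--     rules:
--     * A location that hasn't been fired on should be water ("~")
--     * A location that has been fired on and is a miss (no ship)
--         should be blank (" ")
--     * A location that has been fired on but is not a complete
--         wrecked ship should be an asterisk ("*")
--     * And lastly, a location that has been fired on where the ship
--         is completely sunk should be the letter corresponding to that
--         ship (either "C", "B", "D", "S", or "P")
--     '''
--     new_board = []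
--     for r in range(len(board)):
--         row = []
--         for c in range(len(board[0])):
--             if (r,c) in firedAt:
--                 if board[r][c] == "~":
--                     row.append(" ")
--                 else:
--                     ship = board[r][c]
--                     row.append(ship if len(ships[ship]) == 0 else "*")
--             else:
--                 row.append("~")
--         new_board.append(row)
--     return new_board
-- ===== SOURCE B (Python) =====
-- def makeHiddenBoard(board, ships, firedAt):
--     # Different decomposition: default all-water grid, then one sparse patch
--     # pass over only the fired coordinates (instead of testing every cell).
--     rows = len(board)
--     cols = len(board[0]) if board else 0
--     new_board = [["~"] * cols for _ in range(rows)]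
--     for (r, c) in firedAt:
--         if 0 <= r < rows and 0 <= c < cols:
--             cell = board[r][c]
--             new_board[r][c] = " " if cell == "~" else (cell if len(ships[cell]) == 0 else "*")
--     return new_board
-- ===== Notes on version B (the rewrite author's own statement) =====
-- stated objective: faster
-- what changed: B builds a default all-'~' grid and patches only the fired coordinates in one sparse pass, instead of A's nested loop over every cell with a linear 'in firedAt' membership scan per cell.
import Mathlib
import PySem

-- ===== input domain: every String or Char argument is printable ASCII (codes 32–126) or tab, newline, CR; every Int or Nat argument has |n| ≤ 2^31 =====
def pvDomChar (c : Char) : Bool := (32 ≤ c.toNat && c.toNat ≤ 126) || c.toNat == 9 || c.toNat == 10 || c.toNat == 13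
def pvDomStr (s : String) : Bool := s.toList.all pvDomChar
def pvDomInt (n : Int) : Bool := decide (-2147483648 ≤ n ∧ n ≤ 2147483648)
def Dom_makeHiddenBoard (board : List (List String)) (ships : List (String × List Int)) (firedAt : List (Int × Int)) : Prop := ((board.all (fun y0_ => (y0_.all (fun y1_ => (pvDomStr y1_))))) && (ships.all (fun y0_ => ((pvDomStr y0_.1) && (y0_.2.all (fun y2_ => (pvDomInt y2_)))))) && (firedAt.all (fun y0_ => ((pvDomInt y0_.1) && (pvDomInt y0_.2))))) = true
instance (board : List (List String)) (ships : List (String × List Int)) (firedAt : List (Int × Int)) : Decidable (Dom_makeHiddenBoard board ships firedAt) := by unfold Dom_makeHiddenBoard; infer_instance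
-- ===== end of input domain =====

-- B replaces A's exhaustive per-cell branching (with a linear firedAt scan per cell)
-- by a default all-'~' grid patched in one sparse pass over the fired coordinates.


-- dict lookup ships[k]: first match in the association list (default only reached outside Pre_)
def pvShipsGet (ships : List (String × List Int)) (k : String) : List Int :=
  ((ships.find? (fun p => p.1 == k)).map (·.2)).getD []

-- ===== PORT A =====
def makeHiddenBoard (board : List (List String)) (ships : List (String × List Int)) (firedAt : List (Int × Int)) : List (List String) :=
  (List.range board.length).map (fun (r : Nat) =>
    (List.range (board.headD []).length).map (fun (c : Nat) =>
      if (((r : Int)), ((c : Int))) ∈ firedAt then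
        -- board[r][c] (in range under Pre_; the .getD defaults are unreached there)
        let cell := (PySem.List.pyGet? ((PySem.List.pyGet? board (r : Int)).getD []) (c : Int)).getD ""
        if cell = "~" then " "
        else if (pvShipsGet ships cell).length = 0 then cell else "*"
      else "~"))

-- ===== PORT B =====
def makeHiddenBoard_alt (board : List (List String)) (ships : List (String × List Int)) (firedAt : List (Int × Int)) : List (List String) :=
  let rows := board.length
  let cols := (board.headD []).length
  firedAt.foldl
    (fun nb rc =>
      if 0 ≤ rc.1 ∧ rc.1 < (rows : Int) ∧ 0 ≤ rc.2 ∧ rc.2 < (cols : Int) then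
        let r := rc.1.toNat
        let c := rc.2.toNat
        let cell := (board.getD r []).getD c ""
        nb.set r ((nb.getD r []).set c
          (if cell = "~" then " "
           else if (pvShipsGet ships cell).length = 0 then cell else "*"))
      else nb)
    (List.replicate rows (List.replicate cols "~"))

-- ===== PRECONDITION & SPEC =====
-- Pre_ excludes exactly the inputs where the Python A raises: a fired in-range cell whose row is
-- shorter than board[0] (IndexError on board[r][c]) or whose non-water letter is missing from
-- ships (KeyError on ships[ship]).
def Pre_makeHiddenBoard (board : List (List String)) (ships : List (String × List Int)) (firedAt : List (Int × Int)) : Prop :=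
  ∀ r ∈ List.range board.length, ∀ c ∈ List.range (board.headD []).length,
    ((r : Int), (c : Int)) ∈ firedAt →
      c < (board.getD r []).length ∧
      ((board.getD r []).getD c "" ≠ "~" →
        (ships.find? (fun p => p.1 == (board.getD r []).getD c "")).isSome)
instance (board : List (List String)) (ships : List (String × List Int)) (firedAt : List (Int × Int)) : Decidable (Pre_makeHiddenBoard board ships firedAt) := by unfold Pre_makeHiddenBoard; infer_instance

def pvWitness_makeHiddenBoard : List (List String) × (List (String × List Int)) × (List (Int × Int)) :=
  ([["~", "C"], ["C", "~"]], [("C", [])], [(0, 1), (1, 1), (2, 0), (-1, 0)])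

def Spec_makeHiddenBoard (board : List (List String)) (ships : List (String × List Int)) (firedAt : List (Int × Int)) (out : List (List String)) : Prop := out = makeHiddenBoard_alt board ships firedAt
instance (board : List (List String)) (ships : List (String × List Int)) (firedAt : List (Int × Int)) (out : List (List String)) : Decidable (Spec_makeHiddenBoard board ships firedAt out) := by unfold Spec_makeHiddenBoard; infer_instance

-- ===== CLAIM (what is proved, stated in full; the proofs are below) =====
def Claim_equal_makeHiddenBoard : Prop := ∀ (board : List (List String)) (ships : List (String × List Int)) (firedAt : List (Int × Int)), Dom_makeHiddenBoard board ships firedAt → Pre_makeHiddenBoard board ships firedAt → Spec_makeHiddenBoard board ships firedAt (makeHiddenBoard board ships firedAt)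

-- ===== LEMMAS AND PROOFS =====

-- the cell classification both programs apply to a fired-on in-bounds cell
def pvVal (board : List (List String)) (ships : List (String × List Int)) (r c : Nat) : String :=
  let cell := (board.getD r []).getD c ""
  if cell = "~" then " "
  else if (pvShipsGet ships cell).length = 0 then cell else "*"

def pvGrid (rows cols : Nat) (g : Nat → Nat → String) : List (List String) :=
  (List.range rows).map (fun r => (List.range cols).map (g r))

lemma pvGrid_congr {rows cols : Nat} {g g' : Nat → Nat → String}
    (h : ∀ r < rows, ∀ c < cols, g r c = g' r c) : pvGrid rows cols g = pvGrid rows cols g' := by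
  unfold pvGrid
  refine List.map_congr_left (fun r hr => List.map_congr_left (fun c hc => ?_))
  exact h r (List.mem_range.mp hr) c (List.mem_range.mp hc)

lemma pvGrid_replicate (rows cols : Nat) :
    List.replicate rows (List.replicate cols "~") = pvGrid rows cols (fun _ _ => "~") := by
  unfold pvGrid
  simp [List.map_const']

lemma pvGrid_set {rows cols : Nat} (g : Nat → Nat → String) (r c : Nat) (v : String)
    (hr : r < rows) :
    (pvGrid rows cols g).set r (((pvGrid rows cols g).getD r []).set c v)
      = pvGrid rows cols (fun r' c' => if r' = r ∧ c' = c then v else g r' c') := by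
  have hrow : (pvGrid rows cols g).getD r [] = (List.range cols).map (g r) := by
    unfold pvGrid
    rw [List.getD_eq_getElem?_getD]
    simp [hr]
  rw [hrow]
  apply List.ext_getElem
  · simp [pvGrid]
  · intro i hi1 hi2
    by_cases hir : i = r
    · subst hir
      rw [List.getElem_set_self (by simpa [pvGrid] using hr)]
      apply List.ext_getElem
      · simp [pvGrid]
      · intro j hj1 hj2
        by_cases hjc : j = c
        · subst hjc
          have hc : j < cols := by simpa using hj1
          rw [List.getElem_set_self (by simpa using hc)]
          simp [pvGrid]
        · rw [List.getElem_set_ne (by omega)]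
          simp [pvGrid, hjc]
    · rw [List.getElem_set_ne (by omega)]
      simp [pvGrid, hir]

lemma pvFold_eq (board : List (List String)) (ships : List (String × List Int))
    (fs : List (Int × Int)) :
    ∀ (g : Nat → Nat → String),
    fs.foldl
      (fun nb rc =>
        if 0 ≤ rc.1 ∧ rc.1 < (board.length : Int) ∧ 0 ≤ rc.2 ∧ rc.2 < ((board.headD []).length : Int) then
          nb.set rc.1.toNat ((nb.getD rc.1.toNat []).set rc.2.toNat
            (let cell := (board.getD rc.1.toNat []).getD rc.2.toNat ""
             if cell = "~" then " "
             else if (pvShipsGet ships cell).length = 0 then cell else "*"))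
        else nb)
      (pvGrid board.length (board.headD []).length g)
    = pvGrid board.length (board.headD []).length
        (fun r c => if ((r : Int), (c : Int)) ∈ fs then pvVal board ships r c else g r c) := by
  induction fs with
  | nil => intro g; simp
  | cons rc fs ih =>
    intro g
    rw [List.foldl_cons]
    by_cases hin : 0 ≤ rc.1 ∧ rc.1 < (board.length : Int) ∧ 0 ≤ rc.2 ∧ rc.2 < ((board.headD []).length : Int)
    · rw [if_pos hin]
      have hr : rc.1.toNat < board.length := by omega
      rw [pvGrid_set _ rc.1.toNat rc.2.toNat _ hr, ih]
      apply pvGrid_congr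
      intro r hrlt c hclt
      by_cases heq : ((r : Int), (c : Int)) = rc
      · have h1 : r = rc.1.toNat := by
          have := congrArg Prod.fst heq; dsimp at this; omega
        have h2 : c = rc.2.toNat := by
          have := congrArg Prod.snd heq; dsimp at this; omega
        have hinner : (if r = rc.1.toNat ∧ c = rc.2.toNat then
            (let cell := (board.getD rc.1.toNat []).getD rc.2.toNat ""
             if cell = "~" then " "
             else if (pvShipsGet ships cell).length = 0 then cell else "*")
            else g r c) = pvVal board ships r c := by
          rw [if_pos ⟨h1, h2⟩]; simp [pvVal, h1, h2]
        simp only [List.mem_cons, heq, true_or, if_pos, hinner, ite_self]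
      · have hne : ¬ (r = rc.1.toNat ∧ c = rc.2.toNat) := by
          intro ⟨h1, h2⟩
          apply heq
          have e1 : (r : Int) = rc.1 := by omega
          have e2 : (c : Int) = rc.2 := by omega
          rw [e1, e2]
        simp only [List.mem_cons, heq, false_or, if_neg hne]
    · rw [if_neg hin, ih]
      apply pvGrid_congr
      intro r hrlt c hclt
      have heq : ((r : Int), (c : Int)) ≠ rc := by
        intro h
        apply hin
        have e1 : (r : Int) = rc.1 := by rw [← h]
        have e2 : (c : Int) = rc.2 := by rw [← h]
        refine ⟨by omega, by omega, by omega, by omega⟩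
      simp [List.mem_cons, heq]

-- ===== VERDICT (by name: the statement is the Claim_ definition above) =====
theorem makeHiddenBoard_spec : Claim_equal_makeHiddenBoard := by
  intro board ships firedAt _ _
  unfold Spec_makeHiddenBoard makeHiddenBoard makeHiddenBoard_alt
  dsimp only
  rw [pvGrid_replicate, pvFold_eq]
  unfold pvGrid
  refine (List.map_congr_left (fun r hr => List.map_congr_left (fun c hc => ?_))).symm
  have hrlt := List.mem_range.mp hr
  by_cases hm : ((r : Int), (c : Int)) ∈ firedAt
  · rw [if_pos hm, if_pos hm]
    have hget : (PySem.List.pyGet? board (r : Int)).getD [] = board.getD r [] := by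
      rw [PySem.List.pyGet?_natCast]
      simp [List.getD_eq_getElem?_getD]
    have hcell : (PySem.List.pyGet? ((PySem.List.pyGet? board (r : Int)).getD []) (c : Int)).getD ""
        = (board.getD r []).getD c "" := by
      rw [hget, PySem.List.pyGet?_natCast]
      simp [List.getD_eq_getElem?_getD]
    simp only [pvVal, hcell]
  · rw [if_neg hm, if_neg hm]
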